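-- pv_equiv track=rewrite | github.com/cortana-foundry/cortana | tools/reflection/feedback_verifier.py | file_keyword_hits
-- ===== SOURCE A (Python) =====
-- def file_keyword_hits(files: dict[str, str], keywords: list[str]) -> dict[str, list[str]]:
--     hits: dict[str, list[str]] = {name: [] for name in files}
--     for name, content in files.items():
--         low = content.lower()
--         for kw in keywords:
--             if kw in low:
--                 hits[name].append(kw)
--     return {name: sorted(set(words)) for name, words in hits.items()}
-- ===== SOURCE B (Python) =====
-- def file_keyword_hits(files: dict[str, str], keywords: list[str]) -> dict[str, list[str]]:
--     kws = sorted(set(keywords))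
--     # index the non-empty keywords by their first character
--     buckets: dict[str, list[str]] = {}
--     for kw in kws:
--         if kw:
--             buckets.setdefault(kw[0], []).append(kw)
--     result: dict[str, list[str]] = {}
--     for name, content in files.items():
--         low = content.lower()
--         # the empty keyword is a substring of every content
--         found = set(kw for kw in kws if not kw)
--         # single left-to-right scan: at each position try only the keywords
--         # whose first character is the character at that position
--         for i, ch in enumerate(low):
--             for kw in buckets.get(ch, []):
--                 if low.startswith(kw, i):
--                     found.add(kw)
--         result[name] = sorted(found)
--     return result
-- ===== Notes on version B (the rewrite author's own statement) =====
-- stated objective: alternative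
-- what changed: replaces A's per-keyword substring search over each file with a multi-pattern position scan: keywords are deduplicated, sorted and indexed once by first character, then each lowered content is scanned left-to-right a single time, testing at each position only the keywords bucketed under the current character
import Mathlib
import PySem

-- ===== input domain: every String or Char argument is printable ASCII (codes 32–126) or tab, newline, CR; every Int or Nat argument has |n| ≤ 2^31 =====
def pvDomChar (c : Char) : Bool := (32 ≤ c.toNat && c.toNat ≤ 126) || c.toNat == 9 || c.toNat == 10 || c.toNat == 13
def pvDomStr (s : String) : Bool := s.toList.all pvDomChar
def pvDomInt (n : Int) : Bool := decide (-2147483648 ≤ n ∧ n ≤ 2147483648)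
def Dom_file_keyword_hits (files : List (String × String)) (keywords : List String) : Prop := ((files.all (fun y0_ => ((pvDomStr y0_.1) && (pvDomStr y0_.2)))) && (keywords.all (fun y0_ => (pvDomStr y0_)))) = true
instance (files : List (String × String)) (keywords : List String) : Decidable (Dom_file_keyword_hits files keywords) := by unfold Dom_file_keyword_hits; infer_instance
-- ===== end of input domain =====

-- B replaces A's per-keyword substring search of each file with a multi-pattern position scan:
-- keywords are deduplicated, sorted and indexed once by first character, then each lowered
-- content is scanned left-to-right once, testing only the keywords bucketed under the current
-- character (objective: alternative algorithm, same results).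

-- ===== PORT A =====
-- files is a Python dict; its assoc-list encoding is read through PySem.Dict (last duplicate wins),
-- exactly as dict iteration sees it.
def file_keyword_hits (files : List (String × String)) (keywords : List String) : List (String × List String) :=
  let fs := (PySem.Dict.ofList files).items
  -- hits = {name: [] for name in files}
  let hits : PySem.Dict String (List String) :=
    fs.foldl (fun d p => d.insert p.1 []) PySem.Dict.empty
  -- for name, content in files.items(): for kw in keywords: if kw in low: hits[name].append(kw)
  let hits :=
    fs.foldl (fun d p =>
      keywords.foldl (fun d kw =>
        if PySem.Str.isIn kw (PySem.Str.lower p.2) then d.modify p.1 [] (· ++ [kw]) else d) d) hits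
  -- {name: sorted(set(words)) for name, words in hits.items()}
  hits.items.map (fun p => (p.1, PySem.List.sorted (PySem.Set.ofList p.2) (fun x => x) false))

-- ===== PORT B =====
-- kw[0], applied only to non-empty kw (exact there)
def pvFirst (s : String) : Char := s.toList.headD ' '

def file_keyword_hits_alt (files : List (String × String)) (keywords : List String) : List (String × List String) :=
  let kws := PySem.List.sorted (PySem.Set.ofList keywords) (fun x => x) false
  -- for kw in kws: if kw: buckets.setdefault(kw[0], []).append(kw)   (setdefault+append = Dict.modify … [] (· ++ [kw]), exact)
  let buckets : PySem.Dict Char (List String) :=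
    kws.foldl (fun d kw => if kw == "" then d else d.modify (pvFirst kw) [] (· ++ [kw])) PySem.Dict.empty
  (PySem.Dict.ofList files).items.map (fun p =>
    let lowL := (PySem.Str.lower p.2).toList
    -- found = set(kw for kw in kws if not kw)
    let found0 : PySem.Set String := PySem.Set.ofList (kws.filter (fun kw => kw == ""))
    -- for i, ch in enumerate(low): for kw in buckets.get(ch, []): if low.startswith(kw, i): found.add(kw)
    -- low.startswith(kw, i) with 0 ≤ i < len(low) is exactly Chars.startswith on low[i:]
    let found := (PySem.List.enumerate lowL).foldl (fun f ic =>
      (buckets.getD ic.2 []).foldl (fun f kw =>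
        if PySem.Chars.startswith (lowL.drop ic.1.toNat) kw.toList then PySem.Set.add f kw else f) f) found0
    (p.1, PySem.List.sorted found (fun x => x) false))

-- ===== PRECONDITION & SPEC =====
def Spec_file_keyword_hits (files : List (String × String)) (keywords : List String) (out : List (String × List String)) : Prop := out = file_keyword_hits_alt files keywords
instance (files : List (String × String)) (keywords : List String) (out : List (String × List String)) : Decidable (Spec_file_keyword_hits files keywords out) := by unfold Spec_file_keyword_hits; infer_instance

-- ===== CLAIM (what is proved, stated in full; the proofs are below) =====
def Claim_equal_file_keyword_hits : Prop := ∀ (files : List (String × String)) (keywords : List String), Dom_file_keyword_hits files keywords → Spec_file_keyword_hits files keywords (file_keyword_hits files keywords)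

-- ===== LEMMAS AND PROOFS =====

-- ---- A-side loop characterisation ----

-- inner loop: getD after 'for kw in ks: if q kw: hits[n].append(kw)'
theorem inner_getD (ks : List String) (q : String → Bool) (n m : String)
    (d : PySem.Dict String (List String)) :
    (ks.foldl (fun d kw => if q kw then d.modify n [] (· ++ [kw]) else d) d).getD m []
      = if m = n then d.getD n [] ++ ks.filter q else d.getD m [] := by
  induction ks generalizing d with
  | nil => rcases eq_or_ne m n with h | h <;> simp [h]
  | cons kw ks ih =>
    simp only [List.foldl_cons, List.filter_cons]
    by_cases hq : q kw = true
    · rw [if_pos hq, if_pos hq, ih]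
      rcases eq_or_ne m n with hm | hm
      · subst hm; simp [PySem.Dict.getD_modify_self]
      · rw [if_neg hm, if_neg hm, PySem.Dict.getD_modify_of_ne _ _ _ hm]
    · rw [if_neg hq, if_neg hq, ih]

-- inner loop keeps the key list (the modified key is already present)
theorem inner_keys (ks : List String) (q : String → Bool) (n : String)
    (d : PySem.Dict String (List String)) (hc : d.contains n = true) :
    (ks.foldl (fun d kw => if q kw then d.modify n [] (· ++ [kw]) else d) d).keys = d.keys := by
  induction ks generalizing d with
  | nil => rfl
  | cons kw ks ih =>
    simp only [List.foldl_cons]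
    by_cases hq : q kw = true
    · rw [if_pos hq, ih _ (by simp [PySem.Dict.contains_modify, hc])]
      rw [PySem.Dict.keys_modify, PySem.Dict.keys_insert_of_contains _ _ hc]
    · rw [if_neg hq]; exact ih d hc

-- outer loop keeps the key list (every processed name is already a key)
theorem outer_keys (keywords : List String) (fs : List (String × String))
    (d : PySem.Dict String (List String)) (hc : ∀ p ∈ fs, d.contains p.1 = true) :
    (fs.foldl (fun d p =>
        keywords.foldl (fun d kw =>
          if PySem.Str.isIn kw (PySem.Str.lower p.2) then d.modify p.1 [] (· ++ [kw]) else d) d) d).keys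
      = d.keys := by
  induction fs generalizing d with
  | nil => rfl
  | cons p fs ih =>
    simp only [List.foldl_cons]
    have hk := inner_keys keywords (fun kw => PySem.Str.isIn kw (PySem.Str.lower p.2)) p.1 d
      (hc p (List.mem_cons_self ..))
    rw [ih _ ?_, hk]
    intro p' hp'
    rw [PySem.Dict.contains_iff_mem_keys, hk, ← PySem.Dict.contains_iff_mem_keys]
    exact hc p' (List.mem_cons_of_mem _ hp')

-- outer loop: getD at a key not occurring among the processed pairs is unchanged
theorem outer_getD_not_mem (keywords : List String) (fs : List (String × String))
    (m : String) (hm : m ∉ fs.map Prod.fst) (d : PySem.Dict String (List String)) :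
    (fs.foldl (fun d p =>
        keywords.foldl (fun d kw =>
          if PySem.Str.isIn kw (PySem.Str.lower p.2) then d.modify p.1 [] (· ++ [kw]) else d) d) d).getD m []
      = d.getD m [] := by
  induction fs generalizing d with
  | nil => rfl
  | cons p fs ih =>
    simp only [List.map_cons, List.mem_cons, not_or] at hm
    simp only [List.foldl_cons]
    rw [ih hm.2, inner_getD, if_neg hm.1]

-- outer loop: getD at the key of a processed pair, keys pairwise distinct
theorem outer_getD_mem (keywords : List String) (fs : List (String × String))
    (hnd : (fs.map Prod.fst).Nodup) (p : String × String) (hp : p ∈ fs)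
    (d : PySem.Dict String (List String)) :
    (fs.foldl (fun d p =>
        keywords.foldl (fun d kw =>
          if PySem.Str.isIn kw (PySem.Str.lower p.2) then d.modify p.1 [] (· ++ [kw]) else d) d) d).getD p.1 []
      = d.getD p.1 [] ++ keywords.filter (fun kw => PySem.Str.isIn kw (PySem.Str.lower p.2)) := by
  induction fs generalizing d with
  | nil => cases hp
  | cons p0 fs ih =>
    simp only [List.map_cons, List.nodup_cons] at hnd
    simp only [List.foldl_cons]
    rcases List.mem_cons.mp hp with h | h
    · subst h
      rw [outer_getD_not_mem _ _ _ hnd.1, inner_getD, if_pos rfl]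
    · have hne : p.1 ≠ p0.1 := by
        intro he; exact hnd.1 (he ▸ List.mem_map_of_mem h)
      rw [ih hnd.2 h, inner_getD, if_neg hne]

-- a dict with pairwise-distinct keys is determined by its keys and getD
theorem items_eq_keys_map_getD (d : PySem.Dict String (List String))
    (hnd : d.keys.Nodup) :
    d.items = d.keys.map (fun k => (k, d.getD k [])) := by
  have hk : d.keys.map (fun k => (k, d.getD k []))
      = d.items.map (fun p => (p.1, d.getD p.1 [])) := by
    simp only [PySem.Dict.keys, List.map_map]; rfl
  rw [hk]
  have : d.items.map (fun p => (p.1, d.getD p.1 [])) = d.items.map id := by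
    apply List.map_congr_left
    intro p hp
    have : d.getD p.1 [] = p.2 :=
      PySem.Dict.getD_of_mem_items _ (by rwa [← Prod.mk.eta (p := p)] at hp) hnd []
    simp [this]
  rw [this, List.map_id]

-- ---- B-side loop characterisation ----

-- the bucket fold: getD at a character is the filter of the keywords starting with it
theorem bucket_getD (ks : List String) (c : Char) (d : PySem.Dict Char (List String)) :
    (ks.foldl (fun d kw => if kw == "" then d else d.modify (pvFirst kw) [] (· ++ [kw])) d).getD c []
      = d.getD c [] ++ ks.filter (fun kw => !(kw == "") && pvFirst kw == c) := by
  induction ks generalizing d with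
  | nil => simp
  | cons kw ks ih =>
    simp only [List.foldl_cons, List.filter_cons]
    by_cases he : (kw == "") = true
    · rw [if_pos he]
      have hcond : (!(kw == "") && (pvFirst kw == c)) = false := by rw [he]; rfl
      rw [hcond, if_neg (by simp), ih]
    · have he' : (kw == "") = false := by simpa using he
      rw [if_neg he]
      by_cases hc : (pvFirst kw == c) = true
      · have hcond : (!(kw == "") && (pvFirst kw == c)) = true := by rw [he', hc]; rfl
        rw [hcond, if_pos rfl, ih]
        have hce : pvFirst kw = c := by simpa using hc
        rw [← hce, PySem.Dict.getD_modify_self]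
        simp
      · have hc' : (pvFirst kw == c) = false := by simpa using hc
        have hcond : (!(kw == "") && (pvFirst kw == c)) = false := by rw [he', hc']; rfl
        rw [hcond, if_neg (by simp), ih,
          PySem.Dict.getD_modify_of_ne _ _ _ (fun h => (by simpa using hc : ¬ pvFirst kw = c) h.symm)]

-- membership in the scan fold's set
theorem mem_scan {γ : Type} (L : List γ) (g : γ → List String) (q : γ → String → Bool)
    (f0 : PySem.Set String) (x : String) :
    (x ∈ L.foldl (fun f ic =>
        (g ic).foldl (fun f kw => if q ic kw then PySem.Set.add f kw else f) f) f0)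
      ↔ x ∈ f0 ∨ ∃ ic ∈ L, x ∈ g ic ∧ q ic x = true := by
  have inner : ∀ (ks : List String) (ic : γ) (f : PySem.Set String),
      (x ∈ ks.foldl (fun f kw => if q ic kw then PySem.Set.add f kw else f) f)
        ↔ x ∈ f ∨ (x ∈ ks ∧ q ic x = true) := by
    intro ks ic
    induction ks with
    | nil => simp
    | cons kw ks ih =>
      intro f
      simp only [List.foldl_cons, List.mem_cons]
      by_cases hq : q ic kw = true
      · rw [if_pos hq, ih, PySem.Set.mem_add]
        constructor
        · rintro (⟨h | h⟩ | h)
          · exact Or.inl h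
          · exact Or.inr ⟨Or.inl h, h ▸ hq⟩
          · exact Or.inr ⟨Or.inr h.1, h.2⟩
        · rintro (h | ⟨h | h, hx⟩)
          · exact Or.inl (Or.inl h)
          · exact Or.inl (Or.inr h)
          · exact Or.inr ⟨h, hx⟩
      · rw [if_neg hq, ih]
        constructor
        · rintro (h | h)
          · exact Or.inl h
          · exact Or.inr ⟨Or.inr h.1, h.2⟩
        · rintro (h | ⟨h | h, hx⟩)
          · exact Or.inl h
          · · subst h; exact absurd hx hq
          · exact Or.inr ⟨h, hx⟩
  induction L generalizing f0 with
  | nil => simp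
  | cons ic L ih =>
    simp only [List.foldl_cons, List.mem_cons]
    refine Iff.trans (ih ((g ic).foldl (fun f kw => if q ic kw then PySem.Set.add f kw else f) f0)) ?_
    rw [inner (g ic) ic f0]
    constructor
    · rintro ((h | h) | ⟨ic', h, hx⟩)
      · exact Or.inl h
      · exact Or.inr ⟨ic, Or.inl rfl, h⟩
      · exact Or.inr ⟨ic', Or.inr h, hx⟩
    · rintro (h | ⟨ic', h | h, hx⟩)
      · exact Or.inl (Or.inl h)
      · exact Or.inl (Or.inr (h ▸ hx))
      · exact Or.inr ⟨ic', h, hx⟩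

-- the scan fold keeps the set Nodup
theorem nodup_scan {γ : Type} (L : List γ) (g : γ → List String) (q : γ → String → Bool)
    (f0 : PySem.Set String) (h0 : f0.Nodup) :
    (L.foldl (fun f ic =>
        (g ic).foldl (fun f kw => if q ic kw then PySem.Set.add f kw else f) f) f0).Nodup := by
  have inner : ∀ (ks : List String) (ic : γ) (f : PySem.Set String), f.Nodup →
      (ks.foldl (fun f kw => if q ic kw then PySem.Set.add f kw else f) f).Nodup := by
    intro ks ic
    induction ks with
    | nil => intro f hf; exact hf
    | cons kw ks ih =>
      intro f hf
      simp only [List.foldl_cons]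
      by_cases hq : q ic kw = true
      · rw [if_pos hq]; exact ih _ (PySem.Set.nodup_add _ _ hf)
      · rw [if_neg hq]; exact ih _ hf
  induction L generalizing f0 with
  | nil => exact h0
  | cons ic L ih => exact ih _ (inner _ ic _ h0)

-- a non-empty pattern occurring as a substring matches at some character position
theorem isIn_to_pos (lowL kwL : List Char) (hne : kwL ≠ [])
    (h : PySem.Chars.isIn kwL lowL = true) :
    ∃ k : Nat, ∃ _ : k < lowL.length, kwL.headD ' ' = lowL[k] ∧ kwL <+: lowL.drop k := by
  rcases (PySem.Chars.exists_prefix_drop_iff_isIn _ _).mpr h with ⟨j, hpre⟩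
  rcases kwL with _ | ⟨c, rest⟩
  · exact absurd rfl hne
  rcases hpre with ⟨t, ht⟩
  have hdrop : lowL.drop j = c :: (rest ++ t) := by rw [← ht]; rfl
  have hj : j < lowL.length := by
    by_contra hge
    rw [List.drop_eq_nil_of_le (le_of_not_gt hge)] at hdrop
    simp at hdrop
  have hh : lowL[j]? = some c := by
    rw [← List.head?_drop, hdrop]; rfl
  have h2 : some lowL[j] = some c := by rw [← List.getElem?_eq_getElem hj, hh]
  refine ⟨j, hj, ?_, ⟨t, ht⟩⟩
  simpa using h2.symm

-- per-file equality: sorted(set of A's hit list) = sorted(B's scanned set)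
theorem per_file (keywords : List String) (low : String) :
    PySem.List.sorted
        (PySem.Set.ofList (keywords.filter (fun kw => PySem.Str.isIn kw low)))
        (fun x => x) false
      = PySem.List.sorted
          ((PySem.List.enumerate low.toList).foldl (fun f ic =>
            (((PySem.List.sorted (PySem.Set.ofList keywords) (fun x => x) false).foldl
                (fun d kw => if kw == "" then d else d.modify (pvFirst kw) [] (· ++ [kw]))
                PySem.Dict.empty).getD ic.2 []).foldl (fun f kw =>
              if PySem.Chars.startswith (low.toList.drop ic.1.toNat) kw.toList then PySem.Set.add f kw else f) f)
            (PySem.Set.ofList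
              ((PySem.List.sorted (PySem.Set.ofList keywords) (fun x => x) false).filter (fun kw => kw == ""))))
          (fun x => x) false := by
  rw [PySem.List.sorted_id_eq_sorted_id_iff_perm]
  apply (List.perm_ext_iff_of_nodup (PySem.Set.nodup_ofList _)
    (nodup_scan _ _ _ _ (PySem.Set.nodup_ofList _))).mpr
  intro kw
  rw [PySem.Set.mem_ofList, List.mem_filter, mem_scan]
  have hK : kw ∈ PySem.List.sorted (PySem.Set.ofList keywords) (fun x => x) false ↔ kw ∈ keywords := by
    rw [PySem.List.mem_sorted, PySem.Set.mem_ofList]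
  have hb : ∀ c : Char,
      kw ∈ ((PySem.List.sorted (PySem.Set.ofList keywords) (fun x => x) false).foldl
          (fun d kw => if kw == "" then d else d.modify (pvFirst kw) [] (· ++ [kw]))
          PySem.Dict.empty).getD c []
        ↔ kw ∈ keywords ∧ kw ≠ "" ∧ pvFirst kw = c := by
    intro c
    rw [bucket_getD, PySem.Dict.getD_empty, List.nil_append, List.mem_filter, hK]
    simp
  have h0 : kw ∈ PySem.Set.ofList
      ((PySem.List.sorted (PySem.Set.ofList keywords) (fun x => x) false).filter (fun kw => kw == ""))
        ↔ kw ∈ keywords ∧ kw = "" := by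
    rw [PySem.Set.mem_ofList, List.mem_filter, hK]; simp
  have htl : kw.toList = [] ↔ kw = "" := by
    constructor
    · exact String.toList_eq_nil_iff.mp
    · intro h; simp [h]
  constructor
  · rintro ⟨hmem, hin⟩
    by_cases he : kw = ""
    · exact Or.inl (h0.mpr ⟨hmem, he⟩)
    · have hin' : PySem.Chars.isIn kw.toList low.toList = true := by
        simpa using hin
      rcases (isIn_to_pos low.toList kw.toList (fun h => he (htl.mp h)) hin') with ⟨k, hk, hhd, hpre⟩
      refine Or.inr ⟨((0 : Int) + (k : Int), low.toList[k]), ?_, ?_, ?_⟩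
      · exact (PySem.List.mem_enumerate_iff _ _ _).mpr ⟨k, hk, rfl⟩
      · exact (hb _).mpr ⟨hmem, he, by simpa [pvFirst] using hhd⟩
      · have hnn : ((0 : Int) + (k : Int)).toNat = k := by omega
        simp only [hnn]
        exact (PySem.Chars.startswith_iff _ _).mpr hpre
  · rintro (h | ⟨ic, hic, hbkt, hsw⟩)
    · rcases h0.mp h with ⟨hmem, he⟩
      refine ⟨hmem, ?_⟩
      subst he
      simp [PySem.Chars.isIn_nil]
    · rcases (hb _).mp hbkt with ⟨hmem, _, _⟩
      refine ⟨hmem, ?_⟩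
      rcases (PySem.List.mem_enumerate_iff _ _ _).mp hic with ⟨k, hk, hic'⟩
      subst hic'
      have hnn : ((0 : Int) + (k : Int)).toNat = k := by omega
      rw [hnn] at hsw
      have hpre := (PySem.Chars.startswith_iff _ _).mp hsw
      have : PySem.Chars.isIn kw.toList low.toList = true :=
        (PySem.Chars.exists_prefix_drop_iff_isIn _ _).mp ⟨k, hpre⟩
      simpa using this

-- A = B
theorem file_keyword_hits_eq (files : List (String × String)) (keywords : List String) :
    file_keyword_hits files keywords = file_keyword_hits_alt files keywords := by
  unfold file_keyword_hits file_keyword_hits_alt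
  simp only []
  generalize hfs : (PySem.Dict.ofList files).items = fs
  have hknd : (fs.map Prod.fst).Nodup := by
    rw [← hfs]; exact PySem.Dict.nodup_keys_ofList files
  have hinit : (fs.foldl (fun d p => d.insert p.1 ([] : List String)) PySem.Dict.empty).items
      = fs.map (fun p => (p.1, ([] : List String))) := by
    have := PySem.Dict.items_foldl_insert_fresh (d := (PySem.Dict.empty : PySem.Dict String (List String)))
      (l := fs) (k := Prod.fst) (v := fun _ => ([] : List String))
      (fun a _ => PySem.Dict.contains_empty a.1) hknd
    simpa using this
  set d0 := fs.foldl (fun d p => d.insert p.1 ([] : List String)) PySem.Dict.empty with hd0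
  have hk0 : d0.keys = fs.map Prod.fst := by
    show d0.items.map Prod.fst = fs.map Prod.fst
    rw [hinit, List.map_map]; rfl
  set d2 := fs.foldl (fun d p =>
      keywords.foldl (fun d kw =>
        if PySem.Str.isIn kw (PySem.Str.lower p.2) then PySem.Dict.modify d p.1 [] (· ++ [kw]) else d) d) d0
    with hd2
  have hkeys : d2.keys = fs.map Prod.fst := by
    rw [hd2, outer_keys, hk0]
    intro p hp
    rw [PySem.Dict.contains_iff_mem_keys, hk0]
    exact List.mem_map_of_mem hp
  have hitems : d2.items = fs.map (fun p => (p.1, d2.getD p.1 [])) := by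
    rw [items_eq_keys_map_getD d2 (hkeys ▸ hknd), hkeys, List.map_map]; rfl
  rw [hitems, List.map_map]
  apply List.map_congr_left
  intro p hp
  have hinitD : d0.getD p.1 [] = [] := by
    rcases h : d0.get? p.1 with _ | v
    · exact PySem.Dict.getD_of_get?_eq_none _ _ h
    · have hv := PySem.Dict.mem_items_of_get?_eq_some _ h
      rw [hinit] at hv
      rcases List.mem_map.mp hv with ⟨q, _, hq⟩
      have hv2 : v = [] := (Prod.ext_iff.mp hq).2.symm
      subst hv2
      exact PySem.Dict.getD_of_get?_eq_some _ _ h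
  have hD : d2.getD p.1 [] = keywords.filter (fun kw => PySem.Str.isIn kw (PySem.Str.lower p.2)) := by
    rw [hd2, outer_getD_mem keywords fs hknd p hp, hinitD, List.nil_append]
  simp only [Function.comp, hD]
  exact congrArg (Prod.mk p.1) (per_file keywords (PySem.Str.lower p.2))

-- ===== VERDICT (by name: the statement is the Claim_ definition above) =====
theorem file_keyword_hits_spec : Claim_equal_file_keyword_hits := by
  intro files keywords _
  exact file_keyword_hits_eq files keywords
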